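-- pv_equiv track=rewrite | github.com/Matthew-Pidlysny/9-The-Final-Chapter | Neo-Beta (Research Tote)/bin/ultimate_number_analyzer.py | _check_angel_number
-- ===== SOURCE A (Python) =====
-- def _check_angel_number(number):
--     """Check if number is an angel number."""
--     # Common angel numbers
--     angel_patterns = [
--         '111', '222', '333', '444', '555', '666', '777', '888', '999',
--         '123', '456', '789', '1111', '2222', '3333'
--     ]
--
--     s = str(number)
--     for pattern in angel_patterns:
--         if pattern in s:
--             return True
--
--     return False
-- ===== SOURCE B (Python) =====
-- def _check_angel_number(number):
--     """Check if number is an angel number."""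
--     s = str(number)
--     for a, b, c in zip(s, s[1:], s[2:]):
--         if (a == b == c and '1' <= a <= '9') or \
--            (a, b, c) in (('1', '2', '3'), ('4', '5', '6'), ('7', '8', '9')):
--             return True
--     return False
-- ===== Notes on version B (the rewrite author's own statement) =====
-- stated objective: simpler
-- what changed: Replaces the fifteen independent substring searches over the pattern list by a single left-to-right scan of adjacent three-character windows, using that a run of three equal nonzero digits covers every triple pattern and subsumes the quadruple ones.
import Mathlib
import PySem

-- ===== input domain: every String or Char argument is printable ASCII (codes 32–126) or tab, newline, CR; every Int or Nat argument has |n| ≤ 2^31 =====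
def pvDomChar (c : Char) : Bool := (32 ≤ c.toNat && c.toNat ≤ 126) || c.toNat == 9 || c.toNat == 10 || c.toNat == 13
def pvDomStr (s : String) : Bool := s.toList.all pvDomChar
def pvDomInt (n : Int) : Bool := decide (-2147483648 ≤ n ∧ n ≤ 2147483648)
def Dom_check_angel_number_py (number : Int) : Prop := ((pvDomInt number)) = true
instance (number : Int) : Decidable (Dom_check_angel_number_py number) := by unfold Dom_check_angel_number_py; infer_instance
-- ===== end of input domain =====

-- Header: B replaces A's 15 independent substring searches by one scan of adjacent
-- 3-char windows (triple runs of digits 1-9 subsume the quadruple patterns); objective: simpler.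


-- ===== PORT A =====
def angelPatterns : List String :=
  ["111", "222", "333", "444", "555", "666", "777", "888", "999",
   "123", "456", "789", "1111", "2222", "3333"]

-- for-loop with early `return True` over the pattern list = List.any
def check_angel_number_py (number : Int) : Bool :=
  let s := PySem.Int.toStr number
  angelPatterns.any (fun p => PySem.Str.isIn p s)

-- ===== PORT B =====
-- the window test of Source B: three equal digits 1-9, or an ascending window
def good3 (a b c : Char) : Bool :=
  (a == b && b == c && '1' ≤ a && a ≤ '9') ||
  ((a == '1' && b == '2' && c == '3') ||
   (a == '4' && b == '5' && c == '6') ||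
   (a == '7' && b == '8' && c == '9'))

-- the zip(s, s[1:], s[2:]) loop with early return = scan of adjacent windows
def scan3 : List Char → Bool
  | a :: b :: c :: rest => good3 a b c || scan3 (b :: c :: rest)
  | _ => false

def check_angel_number_py_alt (number : Int) : Bool :=
  scan3 (PySem.Int.toChars number)

-- ===== PRECONDITION & SPEC =====
def Spec_check_angel_number_py (number : Int) (out : Bool) : Prop := out = check_angel_number_py_alt number
instance (number : Int) (out : Bool) : Decidable (Spec_check_angel_number_py number out) := by unfold Spec_check_angel_number_py; infer_instance

-- ===== CLAIM (what is proved, stated in full; the proofs are below) =====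
def Claim_equal_check_angel_number_py : Prop := ∀ (number : Int), Dom_check_angel_number_py number → Spec_check_angel_number_py number (check_angel_number_py number)

-- ===== LEMMAS AND PROOFS =====

theorem char_cases {a : Char} (h1 : '1' ≤ a) (h9 : a ≤ '9') :
    a = '1' ∨ a = '2' ∨ a = '3' ∨ a = '4' ∨ a = '5' ∨ a = '6' ∨ a = '7' ∨ a = '8' ∨ a = '9' := by
  have h1' : 49 ≤ a.toNat := h1
  have h9' : a.toNat ≤ 57 := h9
  have hv : a.toNat = 49 ∨ a.toNat = 50 ∨ a.toNat = 51 ∨ a.toNat = 52 ∨ a.toNat = 53 ∨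
      a.toNat = 54 ∨ a.toNat = 55 ∨ a.toNat = 56 ∨ a.toNat = 57 := by omega
  have key : ∀ (n : Nat) (c : Char), a.toNat = n → c.toNat = n → a = c := by
    intro n c h hc
    exact Char.ext (UInt32.toNat_inj.mp (h.trans hc.symm))
  rcases hv with h|h|h|h|h|h|h|h|h
  · exact Or.inl (key _ '1' h rfl)
  · exact Or.inr (Or.inl (key _ '2' h rfl))
  · exact Or.inr (Or.inr (Or.inl (key _ '3' h rfl)))
  · exact Or.inr (Or.inr (Or.inr (Or.inl (key _ '4' h rfl))))
  · exact Or.inr (Or.inr (Or.inr (Or.inr (Or.inl (key _ '5' h rfl)))))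
  · exact Or.inr (Or.inr (Or.inr (Or.inr (Or.inr (Or.inl (key _ '6' h rfl))))))
  · exact Or.inr (Or.inr (Or.inr (Or.inr (Or.inr (Or.inr (Or.inl (key _ '7' h rfl)))))))
  · exact Or.inr (Or.inr (Or.inr (Or.inr (Or.inr (Or.inr (Or.inr (Or.inl (key _ '8' h rfl))))))))
  · exact Or.inr (Or.inr (Or.inr (Or.inr (Or.inr (Or.inr (Or.inr (Or.inr (key _ '9' h rfl))))))))

theorem scan3_iff (l : List Char) :
    scan3 l = true ↔ ∃ a b c, good3 a b c = true ∧ [a, b, c] <:+: l := by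
  induction l with
  | nil => simp [scan3]
  | cons x t ih =>
    match t, ih with
    | [], _ => simp [scan3]; intro a b c _ h; have := h.length_le; simp at this
    | [y], _ => simp [scan3]; intro a b c _ h; have := h.length_le; simp at this
    | y :: z :: r, ih =>
      constructor
      · intro h
        simp [scan3] at h
        rcases h with h | h
        · exact ⟨x, y, z, h, (List.prefix_iff_eq_take.mpr rfl).isInfix⟩
        · rcases (ih.mp h) with ⟨a, b, c, hg, hi⟩
          exact ⟨a, b, c, hg, hi.trans (List.suffix_cons x _).isInfix⟩
      · rintro ⟨a, b, c, hg, hi⟩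
        rcases List.infix_cons_iff.mp hi with hp | hi'
        · rcases hp with ⟨s, hs⟩
          simp at hs
          obtain ⟨rfl, rfl, rfl, -⟩ := hs
          simp [scan3, hg]
        · simp [scan3]
          exact Or.inr (ih.mpr ⟨a, b, c, hg, hi'⟩)

theorem exists_iff (l : List Char) :
    (∃ p ∈ angelPatterns, p.toList <:+: l) ↔ (∃ a b c, good3 a b c = true ∧ [a, b, c] <:+: l) := by
  constructor
  · rintro ⟨p, hp, hi⟩
    simp [angelPatterns] at hp
    rcases hp with rfl|rfl|rfl|rfl|rfl|rfl|rfl|rfl|rfl|rfl|rfl|rfl|rfl|rfl|rfl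
    · exact ⟨'1', '1', '1', by decide, hi⟩
    · exact ⟨'2', '2', '2', by decide, hi⟩
    · exact ⟨'3', '3', '3', by decide, hi⟩
    · exact ⟨'4', '4', '4', by decide, hi⟩
    · exact ⟨'5', '5', '5', by decide, hi⟩
    · exact ⟨'6', '6', '6', by decide, hi⟩
    · exact ⟨'7', '7', '7', by decide, hi⟩
    · exact ⟨'8', '8', '8', by decide, hi⟩
    · exact ⟨'9', '9', '9', by decide, hi⟩
    · exact ⟨'1', '2', '3', by decide, hi⟩
    · exact ⟨'4', '5', '6', by decide, hi⟩
    · exact ⟨'7', '8', '9', by decide, hi⟩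
    · exact ⟨'1', '1', '1', by decide, (by decide : ['1','1','1'] <:+: "1111".toList).trans hi⟩
    · exact ⟨'2', '2', '2', by decide, (by decide : ['2','2','2'] <:+: "2222".toList).trans hi⟩
    · exact ⟨'3', '3', '3', by decide, (by decide : ['3','3','3'] <:+: "3333".toList).trans hi⟩
  · rintro ⟨a, b, c, hg, hi⟩
    simp [good3] at hg
    rcases hg with ⟨⟨⟨rfl, rfl⟩, h1⟩, h9⟩ | (⟨⟨rfl, rfl⟩, rfl⟩ | ⟨⟨rfl, rfl⟩, rfl⟩) | ⟨⟨rfl, rfl⟩, rfl⟩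
    · rcases char_cases h1 h9 with rfl|rfl|rfl|rfl|rfl|rfl|rfl|rfl|rfl <;>
        first
        | exact ⟨"111", by decide, hi⟩
        | exact ⟨"222", by decide, hi⟩
        | exact ⟨"333", by decide, hi⟩
        | exact ⟨"444", by decide, hi⟩
        | exact ⟨"555", by decide, hi⟩
        | exact ⟨"666", by decide, hi⟩
        | exact ⟨"777", by decide, hi⟩
        | exact ⟨"888", by decide, hi⟩
        | exact ⟨"999", by decide, hi⟩
    · exact ⟨"123", by decide, hi⟩
    · exact ⟨"456", by decide, hi⟩
    · exact ⟨"789", by decide, hi⟩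

-- ===== VERDICT (by name: the statement is the Claim_ definition above) =====
theorem check_angel_number_py_spec : Claim_equal_check_angel_number_py := by
  intro n _
  show check_angel_number_py n = check_angel_number_py_alt n
  unfold check_angel_number_py check_angel_number_py_alt
  rw [Bool.eq_iff_iff, List.any_eq_true]
  constructor
  · rintro ⟨p, hp, hin⟩
    have hi : p.toList <:+: (PySem.Int.toChars n) := by
      have := (PySem.Str.isIn_iff_infix _ _).mp hin
      rwa [PySem.Int.toList_toStr] at this
    exact (scan3_iff _).mpr ((exists_iff _).mp ⟨p, hp, hi⟩)
  · intro h
    rcases (exists_iff _).mpr ((scan3_iff _).mp h) with ⟨p, hp, hi⟩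
    refine ⟨p, hp, (PySem.Str.isIn_iff_infix _ _).mpr ?_⟩
    rwa [PySem.Int.toList_toStr]
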